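-- pv_equiv track=rewrite | github.com/Tadeo-Vazquez/SP_Agrupados_Grupo7_Div112 | paquete/funciones_especificas.py | obtener_elemento_segun_posicion
-- ===== SOURCE A (Python) =====
-- def obtener_elemento_fila(fila,posicion,contador):
--     elemento = None
--     for columna in fila:
--         if contador == posicion:
--             elemento = columna
--         contador += 1
--     return elemento
--
-- def obtener_elemento_segun_posicion(posicion:int, matriz_juego:list)->tuple:
--     contador = 1
--     for fila in matriz_juego:
--         elemento = obtener_elemento_fila(fila,posicion,contador)
--         if elemento != None:
--             break
--         contador += 4
--     return elemento
-- ===== SOURCE B (Python) =====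
-- def obtener_elemento_segun_posicion(posicion: int, matriz_juego: list) -> tuple:
--     for i, fila in enumerate(matriz_juego):
--         j = posicion - 1 - 4 * i
--         if 0 <= j < len(fila):
--             return fila[j]
--     return None
-- ===== Notes on version B (the rewrite author's own statement) =====
-- stated objective: alternative
-- what changed: B replaces A's scan of every cell of every row (inner loop comparing a running counter to posicion) by computing, per row, the target column index j = posicion - 1 - 4*i arithmetically and indexing the row directly, returning at the first row whose index is in range.
import Mathlib
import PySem

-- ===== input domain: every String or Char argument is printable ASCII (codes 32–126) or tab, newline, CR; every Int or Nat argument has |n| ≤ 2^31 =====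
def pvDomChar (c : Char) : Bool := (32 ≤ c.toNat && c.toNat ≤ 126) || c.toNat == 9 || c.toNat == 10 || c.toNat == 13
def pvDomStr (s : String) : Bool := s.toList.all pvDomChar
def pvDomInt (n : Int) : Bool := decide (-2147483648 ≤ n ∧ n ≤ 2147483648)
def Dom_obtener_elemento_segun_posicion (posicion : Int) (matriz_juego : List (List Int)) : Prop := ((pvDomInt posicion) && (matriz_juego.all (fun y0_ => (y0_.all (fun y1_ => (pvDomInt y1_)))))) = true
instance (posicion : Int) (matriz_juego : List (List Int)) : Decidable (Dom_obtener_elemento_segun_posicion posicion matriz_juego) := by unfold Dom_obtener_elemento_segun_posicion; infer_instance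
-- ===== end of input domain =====

-- B finds the element by direct per-row index arithmetic instead of A's counter-driven scan of every cell (objective: alternative).

-- ===== PORT A =====
def obtener_elemento_fila (fila : List Int) (posicion : Int) (contador : Int) : Option Int :=
  (fila.foldl
    (fun (st : Option Int × Int) columna =>
      (if st.2 = posicion then some columna else st.1, st.2 + 1))
    ((none : Option Int), contador)).1

def pvALoop (posicion : Int) : Int → List (List Int) → Option Int
  | _, [] => none
  | contador, fila :: rest =>
      let elemento := obtener_elemento_fila fila posicion contador
      if elemento ≠ none then elemento else pvALoop posicion (contador + 4) rest

def obtener_elemento_segun_posicion (posicion : Int) (matriz_juego : List (List Int)) : Option Int :=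
  pvALoop posicion 1 matriz_juego

-- ===== PORT B =====
def pvBLoop (posicion : Int) : Nat → List (List Int) → Option Int
  | _, [] => none
  | i, fila :: rest =>
      let j := posicion - 1 - 4 * (i : Int)
      if 0 ≤ j ∧ j < fila.length then PySem.List.pyGet? fila j else pvBLoop posicion (i + 1) rest

def obtener_elemento_segun_posicion_alt (posicion : Int) (matriz_juego : List (List Int)) : Option Int :=
  pvBLoop posicion 0 matriz_juego

-- ===== PRECONDITION & SPEC =====
-- Pre_ excludes only the empty matrix, on which A raises UnboundLocalError.
def Pre_obtener_elemento_segun_posicion (posicion : Int) (matriz_juego : List (List Int)) : Prop :=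
  matriz_juego ≠ []
instance (posicion : Int) (matriz_juego : List (List Int)) : Decidable (Pre_obtener_elemento_segun_posicion posicion matriz_juego) := by unfold Pre_obtener_elemento_segun_posicion; infer_instance
def pvWitness_obtener_elemento_segun_posicion : Int × List (List Int) := (3, [[10, 20, 30, 40]])

def Spec_obtener_elemento_segun_posicion (posicion : Int) (matriz_juego : List (List Int)) (out : Option Int) : Prop := out = obtener_elemento_segun_posicion_alt posicion matriz_juego
instance (posicion : Int) (matriz_juego : List (List Int)) (out : Option Int) : Decidable (Spec_obtener_elemento_segun_posicion posicion matriz_juego out) := by unfold Spec_obtener_elemento_segun_posicion; infer_instance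

-- ===== CLAIM (what is proved, stated in full; the proofs are below) =====
def Claim_equal_obtener_elemento_segun_posicion : Prop := ∀ (posicion : Int) (matriz_juego : List (List Int)), Dom_obtener_elemento_segun_posicion posicion matriz_juego → Pre_obtener_elemento_segun_posicion posicion matriz_juego → Spec_obtener_elemento_segun_posicion posicion matriz_juego (obtener_elemento_segun_posicion posicion matriz_juego)

-- ===== LEMMAS AND PROOFS =====

-- A's inner scan over one row, characterised: it yields the row element at offset posicion - c
-- when that offset is in range, and none otherwise.
lemma fila_foldl_char (posicion : Int) :
    ∀ (fila : List Int) (c : Int) (e : Option Int),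
      fila.foldl
        (fun (st : Option Int × Int) columna =>
          (if st.2 = posicion then some columna else st.1, st.2 + 1))
        (e, c)
      = ((if c ≤ posicion ∧ posicion < c + fila.length then PySem.List.pyGet? fila (posicion - c) else e),
          c + fila.length) := by
  intro fila
  induction fila with
  | nil => intro c e; simp
  | cons a l ih =>
      intro c e
      simp only [List.foldl_cons, ih]
      rw [Prod.mk.injEq]
      refine ⟨?_, by push_cast [List.length_cons]; ring⟩
      by_cases h : c = posicion
      · subst h
        have h0 : PySem.List.pyGet? (a :: l) (c - c) = some a := by
          simp [sub_self]
        rw [if_neg (by push_cast [List.length_cons]; omega), if_pos rfl,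
            if_pos ⟨le_rfl, by push_cast [List.length_cons]; omega⟩, h0]
      · by_cases h1 : c + 1 ≤ posicion ∧ posicion < c + 1 + (l.length : Int)
        · have hcond : c ≤ posicion ∧ posicion < c + ((a :: l).length : Int) := by
            push_cast [List.length_cons]; omega
          rw [if_pos h1, if_pos hcond]
          have e1 : PySem.List.pyGet? l (posicion - (c + 1)) = l[(posicion - (c + 1)).toNat]? :=
            PySem.List.pyGet?_of_nonneg _ (by omega)
          have e2 : PySem.List.pyGet? (a :: l) (posicion - c) = (a :: l)[(posicion - c).toNat]? :=
            PySem.List.pyGet?_of_nonneg _ (by omega)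
          have e3 : (posicion - c).toNat = (posicion - (c + 1)).toNat + 1 := by omega
          rw [e1, e2, e3]
          simp
        · have hcond : ¬ (c ≤ posicion ∧ posicion < c + ((a :: l).length : Int)) := by
            push_cast [List.length_cons]; push_cast at h1; omega
          rw [if_neg h1, if_neg hcond, if_neg h]

lemma fila_char (fila : List Int) (posicion c : Int) :
    obtener_elemento_fila fila posicion c
      = if c ≤ posicion ∧ posicion < c + fila.length then PySem.List.pyGet? fila (posicion - c) else none := by
  unfold obtener_elemento_fila
  rw [fila_foldl_char]

lemma loop_agree (posicion : Int) :
    ∀ (rows : List (List Int)) (i : Nat),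
      pvALoop posicion (1 + 4 * (i : Int)) rows = pvBLoop posicion i rows := by
  intro rows
  induction rows with
  | nil => intro i; rfl
  | cons fila rest ih =>
      intro i
      simp only [pvALoop, pvBLoop, fila_char]
      by_cases h : 0 ≤ posicion - 1 - 4 * (i : Int) ∧ posicion - 1 - 4 * (i : Int) < (fila.length : Int)
      · have hc : 1 + 4 * (i : Int) ≤ posicion ∧ posicion < 1 + 4 * (i : Int) + fila.length := by
          constructor <;> omega
        have hsome : PySem.List.pyGet? fila (posicion - (1 + 4 * (i : Int))) ≠ none := by
          rw [Ne, PySem.List.pyGet?_eq_none_iff]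
          simp only [not_not]
          unfold PySem.Raise.InRange
          omega
        simp only [if_pos hc, if_pos h, if_pos hsome]
        congr 1
        omega
      · have hc : ¬ (1 + 4 * (i : Int) ≤ posicion ∧ posicion < 1 + 4 * (i : Int) + fila.length) := by
          omega
        simp only [if_neg hc, if_neg h]
        simp only [ne_eq, not_true_eq_false, if_false]
        have : 1 + 4 * (i : Int) + 4 = 1 + 4 * ((i : Int) + 1) := by ring
        rw [this]
        have := ih (i + 1)
        push_cast at this ⊢
        exact this

-- ===== VERDICT (by name: the statement is the Claim_ definition above) =====
theorem obtener_elemento_segun_posicion_spec : Claim_equal_obtener_elemento_segun_posicion := by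
  intro posicion matriz _ _
  unfold Spec_obtener_elemento_segun_posicion
  unfold obtener_elemento_segun_posicion obtener_elemento_segun_posicion_alt
  have := loop_agree posicion matriz 0
  simpa using this
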